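-- pv_equiv track=rewrite | github.com/aldindugolli/lagis | src/agents/context/agent.py | _analyze_alliance_dynamics
-- ===== SOURCE A (Python) =====
-- from typing import Dict, Any, List, Set
--
-- def _analyze_alliance_dynamics(countries: List[str]) -> str:
--     """Analyze alliance relationships between involved countries"""
--     alliance_groups = {
--         "nato": ["usa", "germany", "france", "uk", "italy", "canada", "poland", "turkey"],
--         "post_soviet": ["russia", "belarus", "kazakhstan", "armenia", "kyrgyzstan"],
--         "brics": ["china", "india", "russia", "brazil", "south africa", "iran", "saudi"]
--     }
--
--     found_groups = []
--     for group_name, members in alliance_groups.items():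
--         intersection = [c.lower() for c in countries if c.lower() in members]
--         if len(intersection) >= 2:
--             found_groups.append(f"{group_name.upper()} members: {', '.join(intersection)}")
--
--     if found_groups:
--         return "Alliance dynamics: " + "; ".join(found_groups)
--     return ""
-- ===== SOURCE B (Python) =====
-- # B: reverse index country -> alliance groups; one pass over the input
-- # building per-group accumulators, then emit groups with >= 2 hits.
-- _MEMBER_GROUPS = {
--     "usa": ("nato",), "germany": ("nato",), "france": ("nato",), "uk": ("nato",),
--     "italy": ("nato",), "canada": ("nato",), "poland": ("nato",), "turkey": ("nato",),
--     "russia": ("post_soviet", "brics"),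
--     "belarus": ("post_soviet",), "kazakhstan": ("post_soviet",),
--     "armenia": ("post_soviet",), "kyrgyzstan": ("post_soviet",),
--     "china": ("brics",), "india": ("brics",), "brazil": ("brics",),
--     "south africa": ("brics",), "iran": ("brics",), "saudi": ("brics",),
-- }
-- _GROUP_ORDER = ("nato", "post_soviet", "brics")
--
-- def _analyze_alliance_dynamics(countries):
--     acc = {}
--     for c in countries:
--         lc = c.lower()
--         for g in _MEMBER_GROUPS.get(lc, ()):
--             acc.setdefault(g, []).append(lc)
--     parts = [f"{g.upper()} members: {', '.join(acc.get(g, []))}"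
--              for g in _GROUP_ORDER if len(acc.get(g, [])) >= 2]
--     if parts:
--         return "Alliance dynamics: " + "; ".join(parts)
--     return ""
-- ===== Notes on version B (the rewrite author's own statement) =====
-- stated objective: faster
-- what changed: Replaces A's per-group rescans of the whole input (list membership scan per country per group) with a precomputed reverse index (country -> its alliance groups) and a single pass over the input filling per-group accumulators.
import Mathlib
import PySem

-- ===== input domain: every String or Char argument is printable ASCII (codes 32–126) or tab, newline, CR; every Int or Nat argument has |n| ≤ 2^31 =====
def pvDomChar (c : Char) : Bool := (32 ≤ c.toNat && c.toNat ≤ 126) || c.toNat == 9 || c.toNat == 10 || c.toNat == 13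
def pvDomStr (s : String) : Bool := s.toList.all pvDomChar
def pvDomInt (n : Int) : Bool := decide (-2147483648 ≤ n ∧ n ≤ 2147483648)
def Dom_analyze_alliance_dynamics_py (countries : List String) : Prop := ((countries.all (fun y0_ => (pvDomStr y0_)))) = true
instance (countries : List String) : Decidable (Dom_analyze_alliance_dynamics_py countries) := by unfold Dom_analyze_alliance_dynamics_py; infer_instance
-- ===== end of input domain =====

-- B replaces A's per-group scan of the whole input with a reverse index
-- (country -> groups) and ONE pass over the input (objective: faster; measured).

-- ===== PORT A =====
def pvAllianceGroups : List (String × List String) :=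
  [("nato", ["usa", "germany", "france", "uk", "italy", "canada", "poland", "turkey"]),
   ("post_soviet", ["russia", "belarus", "kazakhstan", "armenia", "kyrgyzstan"]),
   ("brics", ["china", "india", "russia", "brazil", "south africa", "iran", "saudi"])]

def analyze_alliance_dynamics_py (countries : List String) : String :=
  let found := pvAllianceGroups.foldl (fun acc p =>
    let inter := (countries.filter (fun c => p.2.contains (PySem.Str.lower c))).map
        (fun c => PySem.Str.lower c)
    if 2 ≤ inter.length then
      acc ++ [PySem.Str.upper p.1 ++ " members: " ++ PySem.Str.join ", " inter]
    else acc) []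
  if found ≠ [] then "Alliance dynamics: " ++ PySem.Str.join "; " found else ""

-- ===== PORT B =====
def pvMemberGroups : PySem.Dict String (List String) := PySem.Dict.ofList
  [("usa", ["nato"]), ("germany", ["nato"]), ("france", ["nato"]), ("uk", ["nato"]),
   ("italy", ["nato"]), ("canada", ["nato"]), ("poland", ["nato"]), ("turkey", ["nato"]),
   ("russia", ["post_soviet", "brics"]),
   ("belarus", ["post_soviet"]), ("kazakhstan", ["post_soviet"]),
   ("armenia", ["post_soviet"]), ("kyrgyzstan", ["post_soviet"]),
   ("china", ["brics"]), ("india", ["brics"]), ("brazil", ["brics"]),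
   ("south africa", ["brics"]), ("iran", ["brics"]), ("saudi", ["brics"])]

def pvGroupOrder : List String := ["nato", "post_soviet", "brics"]

def analyze_alliance_dynamics_py_alt (countries : List String) : String :=
  let acc := countries.foldl (fun d c =>
      let lc := PySem.Str.lower c
      (pvMemberGroups.getD lc []).foldl (fun d g => d.modify g [] (· ++ [lc])) d)
    PySem.Dict.empty
  let parts := (pvGroupOrder.filter (fun g => 2 ≤ (acc.getD g []).length)).map
      (fun g => PySem.Str.upper g ++ " members: " ++ PySem.Str.join ", " (acc.getD g []))
  if parts ≠ [] then "Alliance dynamics: " ++ PySem.Str.join "; " parts else ""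

-- ===== PRECONDITION & SPEC =====
def Spec_analyze_alliance_dynamics_py (countries : List String) (out : String) : Prop := out = analyze_alliance_dynamics_py_alt countries
instance (countries : List String) (out : String) : Decidable (Spec_analyze_alliance_dynamics_py countries out) := by unfold Spec_analyze_alliance_dynamics_py; infer_instance

-- ===== CLAIM (what is proved, stated in full; the proofs are below) =====
def Claim_equal_analyze_alliance_dynamics_py : Prop := ∀ (countries : List String), Dom_analyze_alliance_dynamics_py countries → Spec_analyze_alliance_dynamics_py countries (analyze_alliance_dynamics_py countries)

-- ===== LEMMAS AND PROOFS =====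

-- the pairs (group, lowered country) generated by B's nested loop, flattened
def pvPairs (countries : List String) : List (String × String) :=
  countries.flatMap (fun c =>
    (pvMemberGroups.getD (PySem.Str.lower c) []).map (fun g => (g, PySem.Str.lower c)))

-- B's nested fold is the flat fold over pvPairs
lemma acc_eq_pairs_fold (countries : List String) (d : PySem.Dict String (List String)) :
    countries.foldl (fun d c =>
      let lc := PySem.Str.lower c
      (pvMemberGroups.getD lc []).foldl (fun d g => d.modify g [] (· ++ [lc])) d) d
    = (pvPairs countries).foldl (fun d p => d.modify p.1 [] (· ++ [p.2])) d := by
  induction countries generalizing d with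
  | nil => simp [pvPairs]
  | cons c cs ih =>
      simp only [List.foldl_cons, pvPairs, List.flatMap_cons, List.foldl_append, List.foldl_map]
      rw [ih]
      rfl

lemma pvPairs_cons (c : String) (cs : List String) :
    pvPairs (c :: cs) =
      (pvMemberGroups.getD (PySem.Str.lower c) []).map (fun g => (g, PySem.Str.lower c))
        ++ pvPairs cs := rfl

-- the reverse index, as the literal association list it builds
lemma pvMemberGroups_eq : pvMemberGroups = PySem.Dict.mk
  [("usa", ["nato"]), ("germany", ["nato"]), ("france", ["nato"]), ("uk", ["nato"]),
   ("italy", ["nato"]), ("canada", ["nato"]), ("poland", ["nato"]), ("turkey", ["nato"]),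
   ("russia", ["post_soviet", "brics"]),
   ("belarus", ["post_soviet"]), ("kazakhstan", ["post_soviet"]),
   ("armenia", ["post_soviet"]), ("kyrgyzstan", ["post_soviet"]),
   ("china", ["brics"]), ("india", ["brics"]), ("brazil", ["brics"]),
   ("south africa", ["brics"]), ("iran", ["brics"]), ("saudi", ["brics"])] := by decide

-- per-country dispatch: which groups a lowered name feeds, compared with A's member lists
lemma dispatch (g : String) (mem : List String)
    (h : ∀ lc, ((pvMemberGroups.getD lc []).map (fun n => (n, lc))).filter
          (fun p => p.1 == g) = if mem.contains lc then [(g, lc)] else []) :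
    ∀ countries, ((pvPairs countries).filter (fun p => p.1 == g)).map (fun p => p.2)
      = (countries.filter (fun c => mem.contains (PySem.Str.lower c))).map (fun c => PySem.Str.lower c) := by
  intro countries
  induction countries with
  | nil => simp [pvPairs]
  | cons c cs ih =>
      rw [pvPairs_cons, List.filter_append, List.map_append, h (PySem.Str.lower c), ih,
        List.filter_cons]
      by_cases hm : PySem.Str.lower c ∈ mem
      · simp [hm]
      · simp [hm]

def pvKeys : List String := ["usa", "germany", "france", "uk", "italy", "canada", "poland", "turkey", "russia", "belarus", "kazakhstan", "armenia", "kyrgyzstan", "china", "india", "brazil", "south africa", "iran", "saudi"]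

-- a string that is no key of the index is sent to no group
lemma pvIdx_not_key (lc : String) (h : lc ∉ pvKeys) : pvMemberGroups.getD lc [] = [] := by
  apply PySem.Dict.getD_of_not_contains
  rw [pvMemberGroups_eq]
  simp only [pvKeys, List.mem_cons, List.not_mem_nil, or_false, not_or] at h
  simp only [PySem.Dict.contains_mk, List.any_cons, List.any_nil, Bool.or_false,
    Bool.or_eq_false_iff, beq_eq_false_iff_ne, ne_eq]
  tauto

lemma dispatch_hyp_nato : ∀ lc, ((pvMemberGroups.getD lc []).map (fun n => (n, lc))).filter
    (fun p => p.1 == "nato") = if (["usa", "germany", "france", "uk", "italy", "canada", "poland", "turkey"] : List String).contains lc then [("nato", lc)] else [] := by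
  intro lc
  by_cases h : lc ∈ pvKeys
  · simp only [pvKeys, List.mem_cons, List.not_mem_nil, or_false] at h
    rcases h with rfl|rfl|rfl|rfl|rfl|rfl|rfl|rfl|rfl|rfl|rfl|rfl|rfl|rfl|rfl|rfl|rfl|rfl|rfl <;> decide
  · rw [pvIdx_not_key lc h, if_neg]
    · rfl
    · simp only [pvKeys, List.mem_cons, List.not_mem_nil, or_false, not_or] at h
      simp [h]

lemma dispatch_hyp_ps : ∀ lc, ((pvMemberGroups.getD lc []).map (fun n => (n, lc))).filter
    (fun p => p.1 == "post_soviet") = if (["russia", "belarus", "kazakhstan", "armenia", "kyrgyzstan"] : List String).contains lc then [("post_soviet", lc)] else [] := by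
  intro lc
  by_cases h : lc ∈ pvKeys
  · simp only [pvKeys, List.mem_cons, List.not_mem_nil, or_false] at h
    rcases h with rfl|rfl|rfl|rfl|rfl|rfl|rfl|rfl|rfl|rfl|rfl|rfl|rfl|rfl|rfl|rfl|rfl|rfl|rfl <;> decide
  · rw [pvIdx_not_key lc h, if_neg]
    · rfl
    · simp only [pvKeys, List.mem_cons, List.not_mem_nil, or_false, not_or] at h
      simp [h]

lemma dispatch_hyp_brics : ∀ lc, ((pvMemberGroups.getD lc []).map (fun n => (n, lc))).filter
    (fun p => p.1 == "brics") = if (["china", "india", "russia", "brazil", "south africa", "iran", "saudi"] : List String).contains lc then [("brics", lc)] else [] := by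
  intro lc
  by_cases h : lc ∈ pvKeys
  · simp only [pvKeys, List.mem_cons, List.not_mem_nil, or_false] at h
    rcases h with rfl|rfl|rfl|rfl|rfl|rfl|rfl|rfl|rfl|rfl|rfl|rfl|rfl|rfl|rfl|rfl|rfl|rfl|rfl <;> decide
  · rw [pvIdx_not_key lc h, if_neg]
    · rfl
    · simp only [pvKeys, List.mem_cons, List.not_mem_nil, or_false, not_or] at h
      simp [h]

-- B's accumulator at each group key equals A's intersection list
lemma acc_getD (countries : List String) (g : String) (mem : List String)
    (h : ∀ lc, ((pvMemberGroups.getD lc []).map (fun n => (n, lc))).filter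
          (fun p => p.1 == g) = if mem.contains lc then [(g, lc)] else []) :
    ((pvPairs countries).foldl (fun d p => d.modify p.1 [] (· ++ [p.2])) PySem.Dict.empty).getD g []
    = (countries.filter (fun c => mem.contains (PySem.Str.lower c))).map (fun c => PySem.Str.lower c) := by
  rw [PySem.Dict.getD_foldl_modify_append]
  rw [← dispatch g mem h countries]
  simp

-- ===== VERDICT (by name: the statement is the Claim_ definition above) =====
set_option maxHeartbeats 2000000 in
theorem analyze_alliance_dynamics_py_spec : Claim_equal_analyze_alliance_dynamics_py := by
  intro countries _
  unfold Spec_analyze_alliance_dynamics_py analyze_alliance_dynamics_py analyze_alliance_dynamics_py_alt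
  simp only [pvAllianceGroups, pvGroupOrder, List.foldl_cons, List.foldl_nil,
    List.filter_cons, List.filter_nil,
    acc_eq_pairs_fold,
    acc_getD countries "nato" _ dispatch_hyp_nato,
    acc_getD countries "post_soviet" _ dispatch_hyp_ps,
    acc_getD countries "brics" _ dispatch_hyp_brics,
    decide_eq_true_eq]
  split_ifs <;>
    simp_all [acc_getD countries "nato" _ dispatch_hyp_nato,
      acc_getD countries "post_soviet" _ dispatch_hyp_ps,
      acc_getD countries "brics" _ dispatch_hyp_brics]
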